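-- pv_equiv track=rewrite | github.com/slavah8/leetcode | 2031-count-subarrays-with-more-ones-than-zeros/2031-count-subarrays-with-more-ones-than-zeros.py | subarraysWithMoreOnesThanZeroes
-- ===== SOURCE A (Python) =====
-- from typing import List
--
-- class Fenwick:
--
--     def __init__(self, n):
--         self.n = n
--         self.bit = [0] * (n + 1)
--         # bit[i] stores the sum of a chunk ending at i of length lowbit(i)
--         # i = 8, lowbit = 8 → stores arr[1..8]
--         # bit[i]=sum(arr[i−lowbit(i)+1...i])
--         # i = 6, lowbit = 2 → stores arr[5..6]
--
--     def add(self, i, delta):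
--         while i <= self.n:
--             self.bit[i] += delta
--             i += i & -i
--
--     def sum(self, i):
--         s = 0
--         while i > 0:
--             s += self.bit[i]
--             i -= i & -i
--         return s
--
-- def subarraysWithMoreOnesThanZeroes(nums: List[int]) -> int:
--     MOD = 10 ** 9 + 7
--
--     n = len(nums)
--     offset = n + 1
--     size = 2 * n + 3
--
--     ft = Fenwick(size)
--
--     pref = 0
--     ans = 0
--
--     # insert pref=0 first
--     ft.add(pref + offset, 1)
--
--     for x in nums:
--         pref += 1 if x == 1 else -1
--
--         # count how many prefix sums are < current pref
--
--         idx = pref + offset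
--         ans += ft.sum(idx - 1)
--         idx %= MOD
--         ft.add(pref + offset, 1)
--
--
--     return ans % MOD
-- ===== SOURCE B (Python) =====
-- from typing import List
--
-- def subarraysWithMoreOnesThanZeroes(nums: List[int]) -> int:
--     MOD = 10 ** 9 + 7
--     freq = {0: 1}        # multiplicity of each prefix sum seen so far
--     pref = 0
--     less = 0             # how many earlier prefix sums are < pref
--     ans = 0
--     for x in nums:
--         if x == 1:
--             less += freq.get(pref, 0)
--             pref += 1
--         else:
--             pref -= 1
--             less -= freq.get(pref, 0)
--         ans += less
--         freq[pref] = freq.get(pref, 0) + 1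
--     return ans % MOD
-- ===== Notes on version B (the rewrite author's own statement) =====
-- stated objective: faster
-- what changed: Replaced the Fenwick-tree prefix-sum counting with an O(n) scan that maintains, via ±1 incremental frequency updates in a dict, the running count of earlier prefix sums smaller than the current one.
import Mathlib
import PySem

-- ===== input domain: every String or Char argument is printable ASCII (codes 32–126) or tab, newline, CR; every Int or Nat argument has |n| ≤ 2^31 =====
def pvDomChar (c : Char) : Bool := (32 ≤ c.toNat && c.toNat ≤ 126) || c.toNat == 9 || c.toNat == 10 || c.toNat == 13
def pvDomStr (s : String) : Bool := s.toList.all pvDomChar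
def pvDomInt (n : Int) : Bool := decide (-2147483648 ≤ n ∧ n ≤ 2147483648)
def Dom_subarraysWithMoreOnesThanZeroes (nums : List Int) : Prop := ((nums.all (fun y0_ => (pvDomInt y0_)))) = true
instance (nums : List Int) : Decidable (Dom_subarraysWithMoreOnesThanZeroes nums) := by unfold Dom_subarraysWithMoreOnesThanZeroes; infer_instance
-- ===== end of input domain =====

-- B replaces A's Fenwick-tree counting of smaller prefix sums by a one-pass running count
-- maintained with ±1 frequency-dictionary updates (objective: faster, O(n) instead of O(n log n)).

-- ===== PORT A =====
-- `i & -i` of Python (exact: PySem.Int.band is Python's `&`)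
def pyLowbit (i : Int) : Int := PySem.Int.band i (-i)

lemma pyLowbit_coe (i : Int) (h : 0 < i) :
    pyLowbit i = ((i.toNat - (i.toNat &&& (i.toNat - 1)) : Nat) : Int) := by
  simp [pyLowbit, PySem.Int.band]
  omega

lemma pyLowbit_pos (i : Int) (h : 0 < i) : 1 ≤ pyLowbit i := by
  rw [pyLowbit_coe i h]
  have hand : i.toNat &&& (i.toNat - 1) ≤ i.toNat - 1 := Nat.and_le_right
  omega

lemma pyLowbit_le (i : Int) (h : 0 < i) : pyLowbit i ≤ i := by
  rw [pyLowbit_coe i h]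
  have hand : i.toNat &&& (i.toNat - 1) ≤ i.toNat - 1 := Nat.and_le_right
  omega

-- Fenwick.add: `while i <= n: bit[i] += delta; i += i & -i`
-- (the `0 < i` guard only makes the recursion total: Python diverges there, and A never calls it so)
def ftAdd (n : Int) (bit : List Int) (i : Int) (delta : Int) : List Int :=
  if h : 0 < i ∧ i ≤ n then
    ftAdd n (bit.set i.toNat (bit.getD i.toNat 0 + delta)) (i + pyLowbit i) delta
  else bit
termination_by (n + 1 - i).toNat
decreasing_by
  have h1 := pyLowbit_pos i h.1
  omega

-- Fenwick.sum: `while i > 0: s += bit[i]; i -= i & -i`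
def ftSum (bit : List Int) (i : Int) : Int :=
  if h : 0 < i then bit.getD i.toNat 0 + ftSum bit (i - pyLowbit i) else 0
termination_by i.toNat
decreasing_by
  have h1 := pyLowbit_pos i h
  have h2 := pyLowbit_le i h
  omega

def subarraysWithMoreOnesThanZeroes (nums : List Int) : Int :=
  let MOD : Int := 10 ^ 9 + 7
  let n : Int := nums.length
  let offset : Int := n + 1
  let size : Int := 2 * n + 3
  let bit0 : List Int := List.replicate (size + 1).toNat 0
  let bit1 := ftAdd size bit0 (0 + offset) 1
  let st := nums.foldl (fun (st : List Int × Int × Int) x =>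
    let bit := st.1
    let pref := st.2.1 + (if x = 1 then 1 else -1)
    let idx := pref + offset
    let ans := st.2.2 + ftSum bit (idx - 1)
    let _idx := PySem.Int.mod idx MOD   -- Python's dead `idx %= MOD`
    (ftAdd size bit (pref + offset) 1, pref, ans)) (bit1, 0, 0)
  PySem.Int.mod st.2.2 MOD

-- ===== PORT B =====
def subarraysWithMoreOnesThanZeroes_alt (nums : List Int) : Int :=
  let MOD : Int := 10 ^ 9 + 7
  let st := nums.foldl (fun (st : PySem.Dict Int Int × Int × Int × Int) x =>
    let freq := st.1
    let pl : Int × Int :=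
      if x = 1 then (st.2.1 + 1, st.2.2.1 + freq.getD st.2.1 0)
      else (st.2.1 - 1, st.2.2.1 - freq.getD (st.2.1 - 1) 0)
    let ans := st.2.2.2 + pl.2
    (freq.insert pl.1 (freq.getD pl.1 0 + 1), pl.1, pl.2, ans))
    (PySem.Dict.ofList [((0 : Int), (1 : Int))], 0, 0, 0)
  PySem.Int.mod st.2.2.2 MOD

-- ===== PRECONDITION & SPEC =====
def Spec_subarraysWithMoreOnesThanZeroes (nums : List Int) (out : Int) : Prop := out = subarraysWithMoreOnesThanZeroes_alt nums
instance (nums : List Int) (out : Int) : Decidable (Spec_subarraysWithMoreOnesThanZeroes nums out) := by unfold Spec_subarraysWithMoreOnesThanZeroes; infer_instance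

-- ===== CLAIM (what is proved, stated in full; the proofs are below) =====
def Claim_equal_subarraysWithMoreOnesThanZeroes : Prop := ∀ (nums : List Int), Dom_subarraysWithMoreOnesThanZeroes nums → Spec_subarraysWithMoreOnesThanZeroes nums (subarraysWithMoreOnesThanZeroes nums)

-- ===== LEMMAS AND PROOFS =====

-- ---- lowbit = 2 ^ (2-adic valuation) ----
lemma bitwise_and_self (m : Nat) : Nat.bitwise and m m = m := by
  induction m using Nat.binaryRec with
  | zero => simp
  | bit b n ih => rw [Nat.bitwise_bit]; simp [ih]

lemma land_odd_even (m : Nat) : (2 * m + 1) &&& (2 * m) = 2 * m := by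
  have h := Nat.bitwise_bit (f := and) (a := true) (m := m) (b := false) (n := m)
  simp only [Nat.land, Nat.bit, Bool.toNat, bitwise_and_self] at h ⊢
  simpa [two_mul] using h

lemma land_even_odd (n k : Nat) : (2 * n) &&& (2 * k + 1) = 2 * (n &&& k) := by
  have h := Nat.bitwise_bit (f := and) (a := false) (m := n) (b := true) (n := k)
  simp only [Nat.land, Nat.bit, Bool.toNat] at h ⊢
  simpa [two_mul] using h

def LB (n : Nat) : Nat := n - (n &&& (n - 1))

lemma LB_le (n : Nat) : LB n ≤ n := by unfold LB; omega

lemma LB_spec : ∀ (a m : Nat), LB (2 ^ a * (2 * m + 1)) = 2 ^ a := by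
  intro a
  induction a with
  | zero =>
    intro m
    unfold LB
    simp only [pow_zero, one_mul]
    have h : (2 * m + 1) - 1 = 2 * m := by omega
    rw [h, land_odd_even]
    omega
  | succ a ih =>
    intro m
    have hn' : 1 ≤ 2 ^ a * (2 * m + 1) := Nat.one_le_iff_ne_zero.mpr (by positivity)
    have hkey : 2 ^ (a + 1) * (2 * m + 1) = 2 * (2 ^ a * (2 * m + 1)) := by ring
    unfold LB
    rw [hkey]
    have hpred : 2 * (2 ^ a * (2 * m + 1)) - 1 = 2 * (2 ^ a * (2 * m + 1) - 1) + 1 := by omega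
    rw [hpred, land_even_odd]
    have := ih m
    unfold LB at this
    have hand : (2 ^ a * (2 * m + 1)) &&& (2 ^ a * (2 * m + 1) - 1) ≤ 2 ^ a * (2 * m + 1) - 1 :=
      Nat.and_le_right
    omega

lemma pyLowbit_LB (i : Int) (h : 0 < i) : pyLowbit i = ((LB i.toNat : Nat) : Int) := by
  rw [pyLowbit_coe i h]; rfl

lemma exists_decomp (n : Nat) (h : 0 < n) : ∃ a m, n = 2 ^ a * (2 * m + 1) := by
  induction n using Nat.strong_induction_on with
  | _ n ih =>
    rcases Nat.even_or_odd n with he | ho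
    · obtain ⟨k, hk⟩ := he
      have hk2 : n = 2 * k := by omega
      have hkpos : 0 < k := by omega
      obtain ⟨a, m, ham⟩ := ih k (by omega) hkpos
      exact ⟨a + 1, m, by rw [hk2, ham]; ring⟩
    · obtain ⟨k, hk⟩ := ho
      exact ⟨0, k, by omega⟩

lemma pow_dvd_odd (k a m : Nat) (h : 2 ^ k ∣ 2 ^ a * (2 * m + 1)) : k ≤ a := by
  by_contra hc
  have h1 : 2 ^ (a + 1) ∣ 2 ^ k := pow_dvd_pow 2 (by omega)
  have h2 : 2 ^ a * 2 ∣ 2 ^ a * (2 * m + 1) := by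
    have := h1.trans h
    rwa [pow_succ] at this
  have h3 : (2 : Nat) ∣ 2 * m + 1 :=
    (mul_dvd_mul_iff_left (a := (2:Nat) ^ a) (by positivity)).mp h2
  omega

lemma decomp_uniq (a m c t : Nat) (h : 2 ^ a * (2 * m + 1) = 2 ^ c * (2 * t + 1)) : a = c := by
  have h1 : 2 ^ a ∣ 2 ^ c * (2 * t + 1) := h ▸ Dvd.intro _ rfl
  have h2 : 2 ^ c ∣ 2 ^ a * (2 * m + 1) := h ▸ Dvd.intro _ rfl
  exact le_antisymm (pow_dvd_odd _ _ _ h1) (pow_dvd_odd _ _ _ h2)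

-- ---- the Fenwick update-path characterisation ----
lemma hits_succ_nat (P J : Nat) (hP : 0 < P) (hJ : 0 < J) :
    (P ≤ J ∧ J < P + LB J) ↔ (J = P ∨ (P + LB P ≤ J ∧ J < P + LB P + LB J)) := by
  obtain ⟨a, m, hJd⟩ := exists_decomp J hJ
  obtain ⟨b, s, hPd⟩ := exists_decomp P hP
  have hLJ : LB J = 2 ^ a := by rw [hJd, LB_spec]
  have hLP : LB P = 2 ^ b := by rw [hPd, LB_spec]
  rw [hLJ, hLP]
  constructor
  · rintro ⟨h1, h2⟩
    rcases eq_or_lt_of_le h1 with he | hlt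
    · exact Or.inl he.symm
    · refine Or.inr ⟨?_, by omega⟩
      by_contra hc
      -- P < J < P + 2^b : the jump from P cannot stop strictly inside P's block
      set r := J - P with hr
      have hr1 : 0 < r := by omega
      have hr2 : r < 2 ^ b := by omega
      obtain ⟨c, t, hrd⟩ := exists_decomp r hr1
      have hcb : c < b := by
        have : 2 ^ c ≤ r := by rw [hrd]; exact Nat.le_mul_of_pos_right _ (by omega)
        have hlt2 : (2:Nat) ^ c < 2 ^ b := by omega
        exact (Nat.pow_lt_pow_iff_right (by omega)).mp hlt2
      obtain ⟨e, hbe⟩ : ∃ e, b = c + 1 + e := ⟨b - c - 1, by omega⟩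
      have hJr : J = 2 ^ c * (2 * (2 ^ e * (2 * s + 1) + t) + 1) := by
        have hJP : J = P + r := by omega
        rw [hJP, hPd, hrd, hbe]
        ring
      have hac : a = c := decomp_uniq a m c _ (by rw [← hJd]; exact hJr)
      have hrc : 2 ^ c ≤ r := by rw [hrd]; exact Nat.le_mul_of_pos_right _ (by omega)
      have hJP : J = P + r := by omega
      have hge : P + 2 ^ a ≤ J := by rw [hac]; omega
      omega
  · rintro (he | ⟨h1, h2⟩)
    · constructor
      · omega
      · have : 0 < 2 ^ a := by positivity
        omega
    · refine ⟨by omega, ?_⟩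
      by_contra hc
      rw [not_lt] at hc
      -- P + 2^a ≤ J ∧ P + 2^b ≤ J < P + 2^b + 2^a
      by_cases hab : b ≤ a
      · -- J - 2^a lands back inside P's block: impossible mod 2^(b+1)
        set t := J - 2 ^ a - P with ht
        have ht1 : J - 2 ^ a = P + t := by omega
        have hJa : J - 2 ^ a = 2 ^ (a + 1) * m := by rw [hJd]; ring_nf; omega
        have hdvd : 2 ^ (b + 1) ∣ 2 ^ (a + 1) * m :=
          Dvd.dvd.mul_right (pow_dvd_pow 2 (by omega)) m
        obtain ⟨k, hk⟩ := hdvd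
        have hPk : 2 ^ (b + 1) * s + 2 ^ b + t = 2 ^ (b + 1) * k := by
          have : P = 2 ^ (b + 1) * s + 2 ^ b := by rw [hPd]; ring
          omega
        have hsk : s < k := by
          have h0 : 2 ^ (b + 1) * s < 2 ^ (b + 1) * k := by omega
          exact Nat.lt_of_mul_lt_mul_left h0
        obtain ⟨d, hd⟩ : ∃ d, k = s + 1 + d := ⟨k - s - 1, by omega⟩
        have hexp : 2 ^ (b + 1) * k = 2 ^ (b + 1) * s + 2 ^ (b + 1) + 2 ^ (b + 1) * d := by
          rw [hd]; ring
        have hbig : 2 ^ b + t ≥ 2 ^ (b + 1) := by omega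
        have : (2:Nat) ^ (b + 1) = 2 * 2 ^ b := by ring
        omega
      · -- a < b : the block of P + 2^b cannot meet J's block
        rw [not_le] at hab
        set Q := P + 2 ^ b with hQ
        have hQd : Q = 2 ^ (b + 1) * (s + 1) := by rw [hQ, hPd]; ring
        set r' := J - Q with hr'
        have hr2 : r' < 2 ^ a := by omega
        rcases Nat.eq_zero_or_pos r' with h0 | hpos
        · have hJQ : J = Q := by omega
          have : 2 ^ (b + 1) ∣ J := by rw [hJQ, hQd]; exact Dvd.intro _ rfl
          have : b + 1 ≤ a := pow_dvd_odd _ _ _ (by rw [← hJd]; exact this)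
          omega
        · obtain ⟨c, t', hrd⟩ := exists_decomp r' hpos
          have hca : c < a := by
            have : 2 ^ c ≤ r' := by rw [hrd]; exact Nat.le_mul_of_pos_right _ (by omega)
            have hlt2 : (2:Nat) ^ c < 2 ^ a := by omega
            exact (Nat.pow_lt_pow_iff_right (by omega)).mp hlt2
          obtain ⟨e, hbe⟩ : ∃ e, b + 1 = c + 1 + e := ⟨b - c, by omega⟩
          have hJr : J = 2 ^ c * (2 * (2 ^ e * (s + 1) + t') + 1) := by
            have hJQ : J = Q + r' := by omega
            rw [hJQ, hQd, hrd, hbe]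
            ring
          have hac : a = c := decomp_uniq a m c _ (by rw [← hJd]; exact hJr)
          omega

lemma hits_succ_int (p j : Int) (hp : 1 ≤ p) (hj : 1 ≤ j) :
    (p ≤ j ∧ j - pyLowbit j < p) ↔
      (j = p ∨ (p + pyLowbit p ≤ j ∧ j - pyLowbit j < p + pyLowbit p)) := by
  rw [pyLowbit_LB j (by omega), pyLowbit_LB p (by omega)]
  have h := hits_succ_nat p.toNat j.toNat (by omega) (by omega)
  have hLJ := LB_le j.toNat
  have hLP := LB_le p.toNat
  constructor
  · rintro ⟨h1, h2⟩
    have := h.mp ⟨by omega, by omega⟩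
    rcases this with he | ⟨ha, hb⟩
    · exact Or.inl (by omega)
    · exact Or.inr ⟨by omega, by omega⟩
  · rintro (he | ⟨ha, hb⟩)
    · have := h.mpr (Or.inl (by omega))
      exact ⟨by omega, by omega⟩
    · have := h.mpr (Or.inr ⟨by omega, by omega⟩)
      exact ⟨by omega, by omega⟩

-- ---- effect of Fenwick add on every cell ----
lemma ftAdd_length (n : Int) (bit : List Int) (i δ : Int) :
    (ftAdd n bit i δ).length = bit.length := by
  rw [ftAdd]
  by_cases h : 0 < i ∧ i ≤ n
  · rw [dif_pos h]
    rw [ftAdd_length n _ (i + pyLowbit i) δ]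
    simp
  · rw [dif_neg h]
termination_by (n + 1 - i).toNat
decreasing_by
  have h1 := pyLowbit_pos i h.1
  omega

lemma ftAdd_getD (n : Int) (bit : List Int) (p δ : Int) (hp : 1 ≤ p)
    (hlen : n + 1 ≤ (bit.length : Int)) (j : Int) (hj : 1 ≤ j) :
    (ftAdd n bit p δ).getD j.toNat 0 =
      bit.getD j.toNat 0 + (if p ≤ j ∧ j ≤ n ∧ j - pyLowbit j < p then δ else 0) := by
  rw [ftAdd]
  by_cases h : 0 < p ∧ p ≤ n
  · rw [dif_pos h]
    have hlb := pyLowbit_pos p h.1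
    have hlbj := pyLowbit_pos j (by omega)
    rw [ftAdd_getD n _ (p + pyLowbit p) δ (by omega) (by simpa using hlen) j hj]
    have hset : (bit.set p.toNat (bit.getD p.toNat 0 + δ)).getD j.toNat 0 =
        if j = p then bit.getD p.toNat 0 + δ else bit.getD j.toNat 0 := by
      by_cases hjp : j = p
      · subst hjp
        rw [if_pos rfl]
        have hlt : j.toNat < bit.length := by omega
        simp [List.getD, List.getElem?_set_self hlt]
      · rw [if_neg hjp]
        have hne : p.toNat ≠ j.toNat := by omega
        simp [List.getD, List.getElem?_set_ne hne]
    rw [hset]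
    have hiff := hits_succ_int p j hp hj
    by_cases hjp : j = p
    · subst hjp
      rw [if_pos rfl]
      have hc1 : ¬(j + pyLowbit j ≤ j ∧ j ≤ n ∧ j - pyLowbit j < j + pyLowbit j) := by
        rintro ⟨hx, -, -⟩; omega
      have hc2 : j ≤ j ∧ j ≤ n ∧ j - pyLowbit j < j := ⟨le_refl j, h.2, by omega⟩
      rw [if_neg hc1, if_pos hc2]
      ring
    · rw [if_neg hjp]
      have hcond : (p + pyLowbit p ≤ j ∧ j ≤ n ∧ j - pyLowbit j < p + pyLowbit p) ↔
          (p ≤ j ∧ j ≤ n ∧ j - pyLowbit j < p) := by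
        constructor
        · rintro ⟨h1, h2, h3⟩
          have h4 := hiff.mpr (Or.inr ⟨h1, h3⟩)
          exact ⟨h4.1, h2, h4.2⟩
        · rintro ⟨h1, h2, h3⟩
          rcases hiff.mp ⟨h1, h3⟩ with he | ⟨ha, hb⟩
          · exact absurd he hjp
          · exact ⟨ha, h2, hb⟩
      rw [if_congr hcond rfl rfl]
  · rw [dif_neg h]
    have hno : ¬(p ≤ j ∧ j ≤ n ∧ j - pyLowbit j < p) := by
      rintro ⟨h1, h2, -⟩; exact h ⟨by omega, by omega⟩
    rw [if_neg hno]
    ring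
termination_by (n + 1 - p).toNat
decreasing_by
  have h1 := pyLowbit_pos p h.1
  omega

-- ---- the Fenwick invariant ----
def InvA (size : Int) (bit : List Int) (M : List Int) : Prop :=
  (bit.length : Int) = size + 1 ∧
  ∀ j : Int, 1 ≤ j → j ≤ size →
    bit.getD j.toNat 0 =
      ((M.filter (fun v => decide (v ≤ j ∧ j - pyLowbit j < v))).length : Int)

lemma InvA_add (size : Int) (bit : List Int) (M : List Int) (p : Int)
    (hInv : InvA size bit M) (hp : 1 ≤ p) :
    InvA size (ftAdd size bit p 1) (p :: M) := by
  obtain ⟨hlen, hbit⟩ := hInv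
  refine ⟨by rw [ftAdd_length]; exact hlen, ?_⟩
  intro j hj1 hj2
  rw [ftAdd_getD size bit p 1 hp (by omega) j hj1, hbit j hj1 hj2]
  rw [List.filter_cons]
  by_cases hc : p ≤ j ∧ j - pyLowbit j < p
  · rw [if_pos ⟨hc.1, hj2, hc.2⟩]
    have hdec : (decide (p ≤ j ∧ j - pyLowbit j < p)) = true := by simpa using hc
    rw [hdec]
    simp
  · rw [if_neg (by rintro ⟨h1, -, h3⟩; exact hc ⟨h1, h3⟩)]
    have hdec : (decide (p ≤ j ∧ j - pyLowbit j < p)) = false := by simpa using hc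
    rw [hdec]
    simp

-- splitting a filtered count at a boundary
lemma length_filter_split (M : List Int) (P Q R : Int → Bool)
    (h : ∀ v ∈ M, (R v = (P v || Q v)) ∧ ¬(P v = true ∧ Q v = true)) :
    (M.filter R).length = (M.filter P).length + (M.filter Q).length := by
  induction M with
  | nil => simp
  | cons u t ih =>
    have hu := h u (List.mem_cons_self)
    have ht : ∀ v ∈ t, (R v = (P v || Q v)) ∧ ¬(P v = true ∧ Q v = true) :=
      fun v hv => h v (List.mem_cons_of_mem u hv)
    simp only [List.filter_cons]
    cases hP : P u <;> cases hQ : Q u <;>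
      simp_all [List.length_cons] <;> omega

lemma ftSum_eq (size : Int) (bit : List Int) (M : List Int)
    (hInv : InvA size bit M) (hM : ∀ v ∈ M, 1 ≤ v) (q : Int) (hq : q ≤ size) :
    ftSum bit q = ((M.filter (fun v => decide (v ≤ q))).length : Int) := by
  rw [ftSum]
  by_cases h : 0 < q
  · rw [dif_pos h]
    have hlb1 := pyLowbit_pos q h
    have hlb2 := pyLowbit_le q h
    rw [ftSum_eq size bit M hInv hM (q - pyLowbit q) (by omega)]
    rw [hInv.2 q (by omega) hq]
    have hsplit := length_filter_split M
      (fun v => decide (v ≤ q - pyLowbit q))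
      (fun v => decide (v ≤ q ∧ q - pyLowbit q < v))
      (fun v => decide (v ≤ q))
      (by intro v hv
          constructor
          · rcases Decidable.em (v ≤ q - pyLowbit q) with h1 | h1 <;>
              rcases Decidable.em (v ≤ q ∧ q - pyLowbit q < v) with h2 | h2 <;>
              simp_all <;> omega
          · rintro ⟨h1, h2⟩
            simp only [decide_eq_true_eq] at h1 h2
            omega)
    rw [hsplit]
    push_cast
    ring
  · rw [dif_neg h]
    have hnil : M.filter (fun v => decide (v ≤ q)) = [] := by
      apply List.filter_eq_nil_iff.mpr
      intro v hv
      have := hM v hv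
      simp only [decide_eq_true_eq]
      omega
    rw [hnil]
    simp
termination_by q.toNat
decreasing_by
  have h1 := pyLowbit_pos q h
  have h2 := pyLowbit_le q h
  omega

-- ---- the common reference computation: for each new prefix sum, add the number of
-- ---- strictly smaller earlier prefix sums ----
def cntLess (hist : List Int) (v : Int) : Int :=
  ((hist.filter (fun u => decide (u < v))).length : Int)

def refFold : List Int → Int → List Int → Int → Int
  | [], _, _, ans => ans
  | x :: xs, pref, hist, ans =>
    let p := pref + (if x = 1 then 1 else -1)
    refFold xs p (p :: hist) (ans + cntLess hist p)

lemma refFold_cons (x : Int) (xs : List Int) (pref : Int) (hist : List Int) (ans : Int) :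
    refFold (x :: xs) pref hist ans
      = refFold xs (pref + (if x = 1 then 1 else -1))
          ((pref + (if x = 1 then 1 else -1)) :: hist)
          (ans + cntLess hist (pref + (if x = 1 then 1 else -1))) := rfl

lemma cntLess_succ (h : List Int) (v : Int) :
    cntLess h (v + 1) = cntLess h v + (h.count v : Int) := by
  unfold cntLess
  have hsplit := length_filter_split h
    (fun u => decide (u < v)) (fun u => u == v) (fun u => decide (u < v + 1))
    (by intro u hu
        constructor
        · dsimp only
          rcases lt_trichotomy u v with h1 | h1 | h1
          · have e1 : decide (u < v + 1) = true := decide_eq_true (by omega)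
            have e2 : decide (u < v) = true := decide_eq_true h1
            rw [e1, e2]
            simp
          · have e1 : decide (u < v + 1) = true := decide_eq_true (by omega)
            have e2 : (u == v) = true := by simp [h1]
            rw [e1, e2]
            simp
          · have e1 : decide (u < v + 1) = false := decide_eq_false (by omega)
            have e2 : decide (u < v) = false := decide_eq_false (by omega)
            have e3 : (u == v) = false := by simp; omega
            rw [e1, e2, e3]
            simp
        · rintro ⟨hP, hQ⟩
          simp only [decide_eq_true_eq, beq_iff_eq] at hP hQ
          omega)
  rw [hsplit]
  have hc : (h.filter (fun u => u == v)).length = h.count v := by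
    rw [List.count, List.countP_eq_length_filter]
  rw [hc]
  push_cast
  ring

lemma cntLess_pred (h : List Int) (v : Int) :
    cntLess h (v - 1) = cntLess h v - (h.count (v - 1) : Int) := by
  have hs := cntLess_succ h (v - 1)
  simp only [sub_add_cancel] at hs
  omega

lemma cntLess_cons_self (h : List Int) (v : Int) : cntLess (v :: h) v = cntLess h v := by
  unfold cntLess
  simp

-- ---- the A loop computes refFold ----
lemma foldA (n : Int) :
    ∀ (xs : List Int) (bit : List Int) (hist : List Int) (pref ans : Int),
      InvA (2 * n + 3) bit (hist.map (fun s => s + (n + 1))) →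
      (∀ s ∈ hist, -n ≤ s ∧ s ≤ n) →
      -(n - xs.length) ≤ pref → pref ≤ n - xs.length →
      (xs.foldl (fun (st : List Int × Int × Int) x =>
          (ftAdd (2 * n + 3) st.1 (st.2.1 + (if x = 1 then 1 else -1) + (n + 1)) 1,
           st.2.1 + (if x = 1 then 1 else -1),
           st.2.2 + ftSum st.1 (st.2.1 + (if x = 1 then 1 else -1) + (n + 1) - 1))) (bit, pref, ans)).2.2
        = refFold xs pref hist ans := by
  intro xs
  induction xs with
  | nil => intro bit hist pref ans _ _ _ _; rfl
  | cons x t ih =>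
    intro bit hist pref ans hInv hhist hb1 hb2
    have hlen : (t.length : Int) + 1 = ((x :: t).length : Int) := by
      simp
    set d : Int := if x = 1 then 1 else -1 with hd
    have hd1 : d = 1 ∨ d = -1 := by
      by_cases hx : x = 1
      · exact Or.inl (by simp [hd, hx])
      · exact Or.inr (by simp [hd, hx])
    set p' : Int := pref + d with hp'
    have hp'b : -n ≤ p' ∧ p' ≤ n := by omega
    have hM1 : ∀ v ∈ hist.map (fun s => s + (n + 1)), 1 ≤ v := by
      intro v hv
      obtain ⟨s, hs, rfl⟩ := List.mem_map.mp hv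
      have := hhist s hs
      omega
    have hsum : ftSum bit (p' + (n + 1) - 1) = cntLess hist p' := by
      rw [ftSum_eq (2 * n + 3) bit _ hInv hM1 (p' + (n + 1) - 1) (by omega)]
      unfold cntLess
      have hfil : List.filter ((fun v => decide (v ≤ p' + (n + 1) - 1)) ∘ fun s => s + (n + 1)) hist
          = List.filter (fun u => decide (u < p')) hist :=
        List.filter_congr (fun u hu => by
          simp only [Function.comp_apply]
          exact decide_eq_decide.mpr (by omega))
      rw [List.filter_map, List.length_map, hfil]
    simp only [List.foldl_cons]
    rw [show refFold (x :: t) pref hist ans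
          = refFold t p' (p' :: hist) (ans + cntLess hist p') from rfl]
    rw [← hsum]
    exact ih _ (p' :: hist) p' _
      (by
        have hadd := InvA_add (2 * n + 3) bit (hist.map (fun s => s + (n + 1))) (p' + (n + 1))
          hInv (by omega)
        simpa using hadd)
      (by intro s hs
          rcases List.mem_cons.mp hs with rfl | hs2
          · exact hp'b
          · exact hhist s hs2)
      (by omega) (by omega)

-- ---- the B loop computes refFold ----
lemma foldB :
    ∀ (xs : List Int) (freq : PySem.Dict Int Int) (hist : List Int) (pref less ans : Int),
      (∀ p : Int, freq.getD p 0 = (hist.count p : Int)) →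
      less = cntLess hist pref →
      (xs.foldl (fun (st : PySem.Dict Int Int × Int × Int × Int) x =>
          let pl : Int × Int :=
            if x = 1 then (st.2.1 + 1, st.2.2.1 + st.1.getD st.2.1 0)
            else (st.2.1 - 1, st.2.2.1 - st.1.getD (st.2.1 - 1) 0)
          (st.1.insert pl.1 (st.1.getD pl.1 0 + 1), pl.1, pl.2, st.2.2.2 + pl.2))
          (freq, pref, less, ans)).2.2.2
        = refFold xs pref hist ans := by
  intro xs
  induction xs with
  | nil => intro freq hist pref less ans _ _; rfl
  | cons x t ih =>
    intro freq hist pref less ans hfreq hless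
    have hcount : ∀ (P p : Int),
        (freq.insert P (freq.getD P 0 + 1)).getD p 0 = ((P :: hist).count p : Int) := by
      intro P p
      rw [PySem.Dict.getD_insert]
      by_cases hpp : p = P
      · subst hpp
        rw [if_pos rfl, hfreq, List.count_cons]
        simp
      · rw [if_neg hpp, hfreq, List.count_cons]
        have hPp : ¬(P = p) := fun hh => hpp hh.symm
        simp [hPp]
    by_cases hx : x = 1
    · have hl' : less + freq.getD pref 0 = cntLess hist (pref + 1) := by
        rw [hless, hfreq pref, cntLess_succ]
      simp only [List.foldl_cons]
      rw [show (if x = 1 then ((pref + 1 : Int), less + freq.getD pref 0)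
            else (pref - 1, less - freq.getD (pref - 1) 0)) = (pref + 1, less + freq.getD pref 0)
          from if_pos hx]
      rw [refFold_cons]
      rw [show (if x = 1 then (1:Int) else -1) = 1 from if_pos hx]
      dsimp only
      rw [hl']
      exact ih _ ((pref + 1) :: hist) (pref + 1) _ _
        (hcount (pref + 1)) (cntLess_cons_self hist (pref + 1)).symm
    · have hl' : less - freq.getD (pref - 1) 0 = cntLess hist (pref - 1) := by
        rw [hless, hfreq (pref - 1), cntLess_pred]
      simp only [List.foldl_cons]
      rw [show (if x = 1 then ((pref + 1 : Int), less + freq.getD pref 0)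
            else (pref - 1, less - freq.getD (pref - 1) 0)) = (pref - 1, less - freq.getD (pref - 1) 0)
          from if_neg hx]
      rw [refFold_cons]
      rw [show (if x = 1 then (1:Int) else -1) = -1 from if_neg hx]
      rw [show pref + (-1 : Int) = pref - 1 from by ring]
      dsimp only
      rw [hl']
      exact ih _ ((pref - 1) :: hist) (pref - 1) _ _
        (hcount (pref - 1)) (cntLess_cons_self hist (pref - 1)).symm

-- ===== VERDICT (by name: the statement is the Claim_ definition above) =====
theorem subarraysWithMoreOnesThanZeroes_spec : Claim_equal_subarraysWithMoreOnesThanZeroes := by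
  intro nums _
  show subarraysWithMoreOnesThanZeroes nums = subarraysWithMoreOnesThanZeroes_alt nums
  have hn : (0:Int) ≤ (nums.length : Int) := by positivity
  have hbase : InvA (2 * (nums.length : Int) + 3)
      (List.replicate ((2 * (nums.length : Int) + 3 + 1)).toNat (0:Int)) [] := by
    refine ⟨?_, ?_⟩
    · rw [List.length_replicate]
      omega
    · intro j hj1 hj2
      simp only [List.filter_nil, List.length_nil, Nat.cast_zero]
      simp only [List.getD, List.getElem?_replicate]
      split <;> rfl
  have hinit := InvA_add (2 * (nums.length : Int) + 3) _ []
    (0 + ((nums.length : Int) + 1)) hbase (by omega)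
  have hA := foldA (nums.length : Int) nums
      (ftAdd (2 * (nums.length : Int) + 3)
        (List.replicate ((2 * (nums.length : Int) + 3 + 1)).toNat (0:Int))
        (0 + ((nums.length : Int) + 1)) 1)
      [0] 0 0
      (by simpa using hinit)
      (by intro s hs
          simp only [List.mem_singleton] at hs
          subst hs
          exact ⟨by omega, hn⟩)
      (by omega) (by omega)
  have hco : PySem.Dict.ofList [((0:Int),(1:Int))] = PySem.Dict.counter [(0:Int)] := by rfl
  have hfreq0 : ∀ p : Int,
      (PySem.Dict.ofList [((0:Int),(1:Int))]).getD p 0 = (([0] : List Int).count p : Int) := by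
    intro p
    rw [hco, PySem.Dict.getD_counter]
  have hless0 : (0:Int) = cntLess [0] 0 := by simp [cntLess]
  have hB := foldB nums (PySem.Dict.ofList [((0:Int),(1:Int))]) [0] 0 0 0 hfreq0 hless0
  have hAdef : subarraysWithMoreOnesThanZeroes nums = PySem.Int.mod
      ((nums.foldl (fun (st : List Int × Int × Int) x =>
          (ftAdd (2 * (nums.length:Int) + 3) st.1
            (st.2.1 + (if x = 1 then 1 else -1) + ((nums.length:Int) + 1)) 1,
           st.2.1 + (if x = 1 then 1 else -1),
           st.2.2 + ftSum st.1 (st.2.1 + (if x = 1 then 1 else -1) + ((nums.length:Int) + 1) - 1)))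
        (ftAdd (2 * (nums.length:Int) + 3)
          (List.replicate ((2 * (nums.length:Int) + 3 + 1)).toNat (0:Int))
          (0 + ((nums.length:Int) + 1)) 1, 0, 0)).2.2)
      (10 ^ 9 + 7) := rfl
  have hBdef : subarraysWithMoreOnesThanZeroes_alt nums = PySem.Int.mod
      ((nums.foldl (fun (st : PySem.Dict Int Int × Int × Int × Int) x =>
          let pl : Int × Int :=
            if x = 1 then (st.2.1 + 1, st.2.2.1 + st.1.getD st.2.1 0)
            else (st.2.1 - 1, st.2.2.1 - st.1.getD (st.2.1 - 1) 0)
          (st.1.insert pl.1 (st.1.getD pl.1 0 + 1), pl.1, pl.2, st.2.2.2 + pl.2))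
        (PySem.Dict.ofList [((0:Int),(1:Int))], 0, 0, 0)).2.2.2)
      (10 ^ 9 + 7) := rfl
  rw [hAdef, hBdef, hA, hB]
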